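-- pv_equiv track=rewrite | github.com/HOSSIE-JP/md_emulator | tools/diag_disasm_d5b0.py | reglist
-- ===== SOURCE A (Python) =====
-- AREG = lambda n: "SP" if n == 7 else f"A{n}"
--
-- DREG = lambda n: f"D{n}"
--
-- def reglist(mask, reverse=False):
--     """MOVEM register list decode."""
--     regs = []
--     if reverse:
--         # Pre-decrement: bit 0=A7, bit 7=A0, bit 8=D7, bit 15=D0
--         for i in range(8):
--             if mask & (1 << i): regs.append(AREG(7 - i))
--         for i in range(8):
--             if mask & (1 << (8 + i)): regs.append(DREG(7 - i))
--     else: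
--         for i in range(8):
--             if mask & (1 << i): regs.append(DREG(i))
--         for i in range(8):
--             if mask & (1 << (8 + i)): regs.append(AREG(i))
--     return "/".join(regs)
-- ===== SOURCE B (Python) =====
-- FWD = ["D0", "D1", "D2", "D3", "D4", "D5", "D6", "D7",
--        "A0", "A1", "A2", "A3", "A4", "A5", "A6", "SP"]
--
-- def _indices(m):
--     """Ascending set-bit positions of m, by recursion on the right-shifted mask."""
--     if not m:
--         return []
--     rest = [i + 1 for i in _indices(m >> 1)]
--     return [0] + rest if m & 1 else rest
--
-- def reglist(mask, reverse=False):
--     """MOVEM register list decode."""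
--     idx = _indices(mask & 0xFFFF)
--     return "/".join(FWD[15 - i if reverse else i] for i in idx)
-- ===== Notes on version B (the rewrite author's own statement) =====
-- stated objective: simpler
-- what changed: Replaced A's four direction-specific fixed-range loops with AREG/DREG format helpers by a recursive extractor that shifts the 16-bit mask to collect set-bit positions once, then maps positions through a single forward name table, using an arithmetic 15-i index flip (instead of separate loops and name arithmetic) for the pre-decrement direction.
import Mathlib
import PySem

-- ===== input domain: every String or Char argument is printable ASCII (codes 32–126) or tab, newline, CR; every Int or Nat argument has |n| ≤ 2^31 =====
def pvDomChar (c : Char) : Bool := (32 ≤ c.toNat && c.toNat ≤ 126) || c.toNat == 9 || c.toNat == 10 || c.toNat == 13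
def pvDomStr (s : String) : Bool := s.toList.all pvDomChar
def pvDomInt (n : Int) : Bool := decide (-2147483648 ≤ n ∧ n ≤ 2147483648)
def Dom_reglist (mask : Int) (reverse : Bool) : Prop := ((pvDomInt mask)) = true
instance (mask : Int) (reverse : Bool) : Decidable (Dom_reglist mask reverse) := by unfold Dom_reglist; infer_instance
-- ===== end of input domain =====

-- B replaces A's four direction-specific loops by one recursive set-bit-position extractor on the
-- shifted 16-bit mask plus a single forward name table indexed with a 15-i flip for reverse mode
-- (simpler decomposition, same cost).

-- ===== PORT A =====
-- AREG = lambda n: "SP" if n == 7 else f"A{n}"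
def pvAREG (n : Int) : String := if n == 7 then "SP" else "A" ++ PySem.Int.toStr n
-- DREG = lambda n: f"D{n}"
def pvDREG (n : Int) : String := "D" ++ PySem.Int.toStr n

def reglist (mask : Int) (reverse : Bool) : String :=
  let regs : List String := []
  let regs :=
    if reverse then
      -- for i in range(8): if mask & (1 << i): regs.append(AREG(7 - i))
      let regs := (PySem.List.pyRange 0 8 1).foldl (fun acc i =>
        if PySem.Int.band mask ((1 : Int) <<< i.toNat) ≠ 0 then acc ++ [pvAREG (7 - i)] else acc) regs
      -- for i in range(8): if mask & (1 << (8 + i)): regs.append(DREG(7 - i))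
      (PySem.List.pyRange 0 8 1).foldl (fun acc i =>
        if PySem.Int.band mask ((1 : Int) <<< (8 + i).toNat) ≠ 0 then acc ++ [pvDREG (7 - i)] else acc) regs
    else
      -- for i in range(8): if mask & (1 << i): regs.append(DREG(i))
      let regs := (PySem.List.pyRange 0 8 1).foldl (fun acc i =>
        if PySem.Int.band mask ((1 : Int) <<< i.toNat) ≠ 0 then acc ++ [pvDREG i] else acc) regs
      -- for i in range(8): if mask & (1 << (8 + i)): regs.append(AREG(i))
      (PySem.List.pyRange 0 8 1).foldl (fun acc i =>
        if PySem.Int.band mask ((1 : Int) <<< (8 + i).toNat) ≠ 0 then acc ++ [pvAREG i] else acc) regs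
  PySem.Str.join "/" regs

-- ===== PORT B =====
def pvFWD : List String := ["D0","D1","D2","D3","D4","D5","D6","D7","A0","A1","A2","A3","A4","A5","A6","SP"]

-- Python's _indices is only ever applied to m = mask & 0xFFFF, which is nonnegative, so Nat is
-- exact here; on nonnegative m, Python's 'm >> 1' is m / 2 and 'm & 1' is m % 2.
def pvIndices (m : Nat) : List Int :=
  if h : m = 0 then []
  else
    let rest := (pvIndices (m / 2)).map (fun i => i + 1)
    if m % 2 = 1 then 0 :: rest else rest
decreasing_by exact Nat.div_lt_self (Nat.pos_of_ne_zero h) (by omega)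

def reglist_alt (mask : Int) (reverse : Bool) : String :=
  -- mask & 0xFFFF is nonnegative (0xFFFF ≥ 0), so .toNat is exact
  let idx := pvIndices (PySem.Int.band mask 65535).toNat
  PySem.Str.join "/" (idx.map (fun i => PySem.List.pyGetD pvFWD (if reverse then 15 - i else i) ""))

-- ===== PRECONDITION & SPEC =====
def Spec_reglist (mask : Int) (reverse : Bool) (out : String) : Prop := out = reglist_alt mask reverse
instance (mask : Int) (reverse : Bool) (out : String) : Decidable (Spec_reglist mask reverse out) := by unfold Spec_reglist; infer_instance

-- ===== CLAIM (what is proved, stated in full; the proofs are below) =====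
def Claim_equal_reglist : Prop := ∀ (mask : Int) (reverse : Bool), Dom_reglist mask reverse → Spec_reglist mask reverse (reglist mask reverse)

-- ===== LEMMAS AND PROOFS =====

-- proof-only fuel/offset version of pvIndices: idxSpec n base m lists base + (positions of set
-- bits among the low n bits of m), in ascending order
def idxSpec : Nat → Int → Nat → List Int
  | 0, _, _ => []
  | n+1, base, m => (if m % 2 = 1 then [base] else []) ++ idxSpec n (base + 1) (m / 2)

theorem idxSpec_map_add_one (n : Nat) : ∀ (base : Int) (m : Nat),
    (idxSpec n base m).map (fun i => i + 1) = idxSpec n (base + 1) m := by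
  induction n with
  | zero => intro base m; rfl
  | succ n ih =>
    intro base m
    simp only [idxSpec, List.map_append, ih]
    by_cases h : m % 2 = 1 <;> simp [h]

theorem pvIndices_eq_idxSpec (n : Nat) : ∀ m : Nat, m < 2^n → pvIndices m = idxSpec n 0 m := by
  induction n with
  | zero =>
    intro m hm
    have : m = 0 := by omega
    subst this; simp [pvIndices, idxSpec]
  | succ n ih =>
    intro m hm
    by_cases h0 : m = 0
    · subst h0
      have : ∀ k b, idxSpec k b 0 = [] := by
        intro k; induction k with
        | zero => intro b; rfl
        | succ k ihk => intro b; simp [idxSpec, ihk]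
      simp [pvIndices, this]
    · rw [pvIndices, dif_neg h0]
      have hlt : m / 2 < 2^n := by
        have h2 : 2^(n+1) = 2 * 2^n := by ring
        omega
      rw [ih (m/2) hlt, idxSpec_map_add_one]
      show _ = idxSpec (n+1) 0 m
      by_cases hp : m % 2 = 1 <;> simp [idxSpec, hp]

-- (2^n - 1 - x) flips the low n bits of x
theorem pvCompTestBit (n : Nat) : ∀ (x k : Nat), x < 2^n → k < n →
    (2^n - 1 - x).testBit k = !x.testBit k := by
  induction n with
  | zero => intro x k _ hk; omega
  | succ n ih =>
    intro x k hx hk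
    have h2 : 2^(n+1) = 2 * 2^n := by ring
    cases k with
    | zero =>
      simp only [Nat.testBit_zero]
      have hx2 : x % 2 = 0 ∨ x % 2 = 1 := by omega
      rcases hx2 with h | h <;> simp [show (2^(n+1) - 1 - x) % 2 = 1 - x % 2 by omega, h]
    | succ k =>
      rw [Nat.testBit_add_one, Nat.testBit_add_one]
      rw [show (2^(n+1) - 1 - x) / 2 = 2^n - 1 - x / 2 by omega]
      exact ih (x/2) k (by omega) (by omega)

-- the single bridge between A's per-bit tests on the raw mask and B's low-16-bit value
theorem pvBridge (mask : Int) (k : Nat) (hk : k < 16) :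
    (PySem.Int.band mask ((2:Int)^k) ≠ 0) ↔
      ((PySem.Int.band mask 65535).toNat).testBit k = true := by
  have hpowN : ((2:Int)^k).toNat = 2^k := by
    rw [show ((2:Int)^k) = ((2^k : Nat) : Int) by push_cast; ring]
    exact Int.toNat_natCast _
  have hpow_nonneg : (0:Int) ≤ (2:Int)^k := by positivity
  by_cases hm : 0 ≤ mask
  · have hband : PySem.Int.band mask ((2:Int)^k) = ((mask.toNat &&& 2^k : Nat) : Int) := by
      simp [PySem.Int.band, hm, hpow_nonneg, hpowN]
    have hband16 : PySem.Int.band mask 65535 = ((mask.toNat &&& 65535 : Nat) : Int) := by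
      simp [PySem.Int.band, hm]
    rw [hband, hband16, Int.toNat_natCast]
    rw [show (65535 : Nat) = 2^16 - 1 by norm_num, Nat.and_two_pow_sub_one_eq_mod,
      Nat.testBit_mod_two_pow, Nat.and_two_pow]
    cases h : mask.toNat.testBit k <;> simp [hk]
  · have hneg : ¬ (0 ≤ mask) := hm
    have hband : PySem.Int.band mask ((2:Int)^k) = ((2^k - (2^k &&& (-mask-1).toNat) : Nat) : Int) := by
      simp [PySem.Int.band, hneg, hpow_nonneg, hpowN]
    have hband16 : PySem.Int.band mask 65535 = ((65535 - (65535 &&& (-mask-1).toNat) : Nat) : Int) := by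
      simp [PySem.Int.band, hneg]
    set c := (-mask-1).toNat with hc
    rw [hband, hband16, Int.toNat_natCast]
    rw [Nat.and_comm (2^k) c, Nat.and_two_pow,
      Nat.and_comm 65535 c, show (65535 : Nat) = 2^16 - 1 by norm_num,
      Nat.and_two_pow_sub_one_eq_mod]
    have hxlt : c % 2^16 < 2^16 := Nat.mod_lt _ (by norm_num)
    rw [pvCompTestBit 16 (c % 2^16) k hxlt hk, Nat.testBit_mod_two_pow]
    have hp : 0 < 2^k := Nat.pow_pos (by norm_num)
    cases h : c.testBit k <;> simp [hk]

theorem pvFilterMapChunk {α β : Type} (p : α → Bool) (f : α → β) (l : List α) :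
    (l.filter p).map f = l.flatMap (fun x => if p x then [f x] else []) := by
  induction l with
  | nil => rfl
  | cons a l ih => by_cases h : p a <;> simp [h, ih]

theorem pvMapChunk {α β : Type} (f : α → β) (c : Prop) [Decidable c] (a : α) :
    (if c then [a] else []).map f = if c then [f a] else [] := by split <;> rfl

theorem pvBandLt (mask : Int) : (PySem.Int.band mask 65535).toNat < 2^16 := by
  by_cases hm : 0 ≤ mask
  · have : PySem.Int.band mask 65535 = ((mask.toNat &&& 65535 : Nat) : Int) := by
      simp [PySem.Int.band, hm]
    rw [this, Int.toNat_natCast]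
    have h : mask.toNat &&& 65535 ≤ 65535 := Nat.and_le_right
    omega
  · have : PySem.Int.band mask 65535 = ((65535 - (65535 &&& (-mask-1).toNat) : Nat) : Int) := by
      simp [PySem.Int.band, hm]
    rw [this, Int.toNat_natCast]
    omega

theorem pvIdxSpec16 (m : Nat) : idxSpec 16 0 m =
    (if m % 2 = 1 then [(0:Int)] else []) ++
    ((if m / 2 % 2 = 1 then [(1:Int)] else []) ++
    ((if m / 4 % 2 = 1 then [(2:Int)] else []) ++
    ((if m / 8 % 2 = 1 then [(3:Int)] else []) ++
    ((if m / 16 % 2 = 1 then [(4:Int)] else []) ++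
    ((if m / 32 % 2 = 1 then [(5:Int)] else []) ++
    ((if m / 64 % 2 = 1 then [(6:Int)] else []) ++
    ((if m / 128 % 2 = 1 then [(7:Int)] else []) ++
    ((if m / 256 % 2 = 1 then [(8:Int)] else []) ++
    ((if m / 512 % 2 = 1 then [(9:Int)] else []) ++
    ((if m / 1024 % 2 = 1 then [(10:Int)] else []) ++
    ((if m / 2048 % 2 = 1 then [(11:Int)] else []) ++
    ((if m / 4096 % 2 = 1 then [(12:Int)] else []) ++
    ((if m / 8192 % 2 = 1 then [(13:Int)] else []) ++
    ((if m / 16384 % 2 = 1 then [(14:Int)] else []) ++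
    ((if m / 32768 % 2 = 1 then [(15:Int)] else []) ++ ([] : List Int)))))))))))))))) := by
  norm_num [idxSpec, Nat.div_div_eq_div_mul]

-- ===== VERDICT (by name: the statement is the Claim_ definition above) =====
set_option maxHeartbeats 4000000 in
theorem reglist_spec : Claim_equal_reglist := by
  intro mask reverse _
  unfold Spec_reglist reglist reglist_alt
  rw [pvIndices_eq_idxSpec 16 _ (pvBandLt mask), pvIdxSpec16]
  set m := (PySem.Int.band mask 65535).toNat with hmdef
  have h8 : PySem.List.pyRange 0 8 1 = [0,1,2,3,4,5,6,7] := by decide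
  have s0 : (1:Int) <<< ((((0:Int)).toNat : Int)) = 1 := by decide
  have s1 : (1:Int) <<< ((((1:Int)).toNat : Int)) = 2 := by decide
  have s2 : (1:Int) <<< ((((2:Int)).toNat : Int)) = 4 := by decide
  have s3 : (1:Int) <<< ((((3:Int)).toNat : Int)) = 8 := by decide
  have s4 : (1:Int) <<< ((((4:Int)).toNat : Int)) = 16 := by decide
  have s5 : (1:Int) <<< ((((5:Int)).toNat : Int)) = 32 := by decide
  have s6 : (1:Int) <<< ((((6:Int)).toNat : Int)) = 64 := by decide
  have s7 : (1:Int) <<< ((((7:Int)).toNat : Int)) = 128 := by decide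
  have t0 : (1:Int) <<< ((((8:Int)+(0:Int)).toNat : Int)) = 256 := by decide
  have t1 : (1:Int) <<< ((((8:Int)+(1:Int)).toNat : Int)) = 512 := by decide
  have t2 : (1:Int) <<< ((((8:Int)+(2:Int)).toNat : Int)) = 1024 := by decide
  have t3 : (1:Int) <<< ((((8:Int)+(3:Int)).toNat : Int)) = 2048 := by decide
  have t4 : (1:Int) <<< ((((8:Int)+(4:Int)).toNat : Int)) = 4096 := by decide
  have t5 : (1:Int) <<< ((((8:Int)+(5:Int)).toNat : Int)) = 8192 := by decide
  have t6 : (1:Int) <<< ((((8:Int)+(6:Int)).toNat : Int)) = 16384 := by decide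
  have t7 : (1:Int) <<< ((((8:Int)+(7:Int)).toNat : Int)) = 32768 := by decide
  have B0 : (PySem.Int.band mask 1 ≠ 0) ↔ (m / 1 % 2 = 1) := by
    have h := pvBridge mask 0 (by norm_num)
    rw [Nat.testBit_eq_decide_div_mod_eq] at h
    rw [hmdef]; norm_num at h ⊢; exact h
  have B1 : (PySem.Int.band mask 2 ≠ 0) ↔ (m / 2 % 2 = 1) := by
    have h := pvBridge mask 1 (by norm_num)
    rw [Nat.testBit_eq_decide_div_mod_eq] at h
    rw [hmdef]; norm_num at h ⊢; exact h
  have B2 : (PySem.Int.band mask 4 ≠ 0) ↔ (m / 4 % 2 = 1) := by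
    have h := pvBridge mask 2 (by norm_num)
    rw [Nat.testBit_eq_decide_div_mod_eq] at h
    rw [hmdef]; norm_num at h ⊢; exact h
  have B3 : (PySem.Int.band mask 8 ≠ 0) ↔ (m / 8 % 2 = 1) := by
    have h := pvBridge mask 3 (by norm_num)
    rw [Nat.testBit_eq_decide_div_mod_eq] at h
    rw [hmdef]; norm_num at h ⊢; exact h
  have B4 : (PySem.Int.band mask 16 ≠ 0) ↔ (m / 16 % 2 = 1) := by
    have h := pvBridge mask 4 (by norm_num)
    rw [Nat.testBit_eq_decide_div_mod_eq] at h
    rw [hmdef]; norm_num at h ⊢; exact h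
  have B5 : (PySem.Int.band mask 32 ≠ 0) ↔ (m / 32 % 2 = 1) := by
    have h := pvBridge mask 5 (by norm_num)
    rw [Nat.testBit_eq_decide_div_mod_eq] at h
    rw [hmdef]; norm_num at h ⊢; exact h
  have B6 : (PySem.Int.band mask 64 ≠ 0) ↔ (m / 64 % 2 = 1) := by
    have h := pvBridge mask 6 (by norm_num)
    rw [Nat.testBit_eq_decide_div_mod_eq] at h
    rw [hmdef]; norm_num at h ⊢; exact h
  have B7 : (PySem.Int.band mask 128 ≠ 0) ↔ (m / 128 % 2 = 1) := by
    have h := pvBridge mask 7 (by norm_num)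
    rw [Nat.testBit_eq_decide_div_mod_eq] at h
    rw [hmdef]; norm_num at h ⊢; exact h
  have B8 : (PySem.Int.band mask 256 ≠ 0) ↔ (m / 256 % 2 = 1) := by
    have h := pvBridge mask 8 (by norm_num)
    rw [Nat.testBit_eq_decide_div_mod_eq] at h
    rw [hmdef]; norm_num at h ⊢; exact h
  have B9 : (PySem.Int.band mask 512 ≠ 0) ↔ (m / 512 % 2 = 1) := by
    have h := pvBridge mask 9 (by norm_num)
    rw [Nat.testBit_eq_decide_div_mod_eq] at h
    rw [hmdef]; norm_num at h ⊢; exact h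
  have B10 : (PySem.Int.band mask 1024 ≠ 0) ↔ (m / 1024 % 2 = 1) := by
    have h := pvBridge mask 10 (by norm_num)
    rw [Nat.testBit_eq_decide_div_mod_eq] at h
    rw [hmdef]; norm_num at h ⊢; exact h
  have B11 : (PySem.Int.band mask 2048 ≠ 0) ↔ (m / 2048 % 2 = 1) := by
    have h := pvBridge mask 11 (by norm_num)
    rw [Nat.testBit_eq_decide_div_mod_eq] at h
    rw [hmdef]; norm_num at h ⊢; exact h
  have B12 : (PySem.Int.band mask 4096 ≠ 0) ↔ (m / 4096 % 2 = 1) := by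
    have h := pvBridge mask 12 (by norm_num)
    rw [Nat.testBit_eq_decide_div_mod_eq] at h
    rw [hmdef]; norm_num at h ⊢; exact h
  have B13 : (PySem.Int.band mask 8192 ≠ 0) ↔ (m / 8192 % 2 = 1) := by
    have h := pvBridge mask 13 (by norm_num)
    rw [Nat.testBit_eq_decide_div_mod_eq] at h
    rw [hmdef]; norm_num at h ⊢; exact h
  have B14 : (PySem.Int.band mask 16384 ≠ 0) ↔ (m / 16384 % 2 = 1) := by
    have h := pvBridge mask 14 (by norm_num)
    rw [Nat.testBit_eq_decide_div_mod_eq] at h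
    rw [hmdef]; norm_num at h ⊢; exact h
  have B15 : (PySem.Int.band mask 32768 ≠ 0) ↔ (m / 32768 % 2 = 1) := by
    have h := pvBridge mask 15 (by norm_num)
    rw [Nat.testBit_eq_decide_div_mod_eq] at h
    rw [hmdef]; norm_num at h ⊢; exact h
  have d0 : pvDREG ((0:Int)) = "D0" := by decide
  have a0 : pvAREG ((0:Int)) = "A0" := by decide
  have rd0 : pvDREG (7 - (0:Int)) = "D7" := by decide
  have ra0 : pvAREG (7 - (0:Int)) = "SP" := by decide
  have d1 : pvDREG ((1:Int)) = "D1" := by decide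
  have a1 : pvAREG ((1:Int)) = "A1" := by decide
  have rd1 : pvDREG (7 - (1:Int)) = "D6" := by decide
  have ra1 : pvAREG (7 - (1:Int)) = "A6" := by decide
  have d2 : pvDREG ((2:Int)) = "D2" := by decide
  have a2 : pvAREG ((2:Int)) = "A2" := by decide
  have rd2 : pvDREG (7 - (2:Int)) = "D5" := by decide
  have ra2 : pvAREG (7 - (2:Int)) = "A5" := by decide
  have d3 : pvDREG ((3:Int)) = "D3" := by decide
  have a3 : pvAREG ((3:Int)) = "A3" := by decide
  have rd3 : pvDREG (7 - (3:Int)) = "D4" := by decide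
  have ra3 : pvAREG (7 - (3:Int)) = "A4" := by decide
  have d4 : pvDREG ((4:Int)) = "D4" := by decide
  have a4 : pvAREG ((4:Int)) = "A4" := by decide
  have rd4 : pvDREG (7 - (4:Int)) = "D3" := by decide
  have ra4 : pvAREG (7 - (4:Int)) = "A3" := by decide
  have d5 : pvDREG ((5:Int)) = "D5" := by decide
  have a5 : pvAREG ((5:Int)) = "A5" := by decide
  have rd5 : pvDREG (7 - (5:Int)) = "D2" := by decide
  have ra5 : pvAREG (7 - (5:Int)) = "A2" := by decide
  have d6 : pvDREG ((6:Int)) = "D6" := by decide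
  have a6 : pvAREG ((6:Int)) = "A6" := by decide
  have rd6 : pvDREG (7 - (6:Int)) = "D1" := by decide
  have ra6 : pvAREG (7 - (6:Int)) = "A1" := by decide
  have d7 : pvDREG ((7:Int)) = "D7" := by decide
  have a7 : pvAREG ((7:Int)) = "SP" := by decide
  have rd7 : pvDREG (7 - (7:Int)) = "D0" := by decide
  have ra7 : pvAREG (7 - (7:Int)) = "A0" := by decide
  have hf0 : PySem.List.pyGetD pvFWD ((0:Int)) "" = "D0" := by decide
  have hb0 : PySem.List.pyGetD pvFWD (15 - (0:Int)) "" = "SP" := by decide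
  have hf1 : PySem.List.pyGetD pvFWD ((1:Int)) "" = "D1" := by decide
  have hb1 : PySem.List.pyGetD pvFWD (15 - (1:Int)) "" = "A6" := by decide
  have hf2 : PySem.List.pyGetD pvFWD ((2:Int)) "" = "D2" := by decide
  have hb2 : PySem.List.pyGetD pvFWD (15 - (2:Int)) "" = "A5" := by decide
  have hf3 : PySem.List.pyGetD pvFWD ((3:Int)) "" = "D3" := by decide
  have hb3 : PySem.List.pyGetD pvFWD (15 - (3:Int)) "" = "A4" := by decide
  have hf4 : PySem.List.pyGetD pvFWD ((4:Int)) "" = "D4" := by decide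
  have hb4 : PySem.List.pyGetD pvFWD (15 - (4:Int)) "" = "A3" := by decide
  have hf5 : PySem.List.pyGetD pvFWD ((5:Int)) "" = "D5" := by decide
  have hb5 : PySem.List.pyGetD pvFWD (15 - (5:Int)) "" = "A2" := by decide
  have hf6 : PySem.List.pyGetD pvFWD ((6:Int)) "" = "D6" := by decide
  have hb6 : PySem.List.pyGetD pvFWD (15 - (6:Int)) "" = "A1" := by decide
  have hf7 : PySem.List.pyGetD pvFWD ((7:Int)) "" = "D7" := by decide
  have hb7 : PySem.List.pyGetD pvFWD (15 - (7:Int)) "" = "A0" := by decide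
  have hf8 : PySem.List.pyGetD pvFWD ((8:Int)) "" = "A0" := by decide
  have hb8 : PySem.List.pyGetD pvFWD (15 - (8:Int)) "" = "D7" := by decide
  have hf9 : PySem.List.pyGetD pvFWD ((9:Int)) "" = "A1" := by decide
  have hb9 : PySem.List.pyGetD pvFWD (15 - (9:Int)) "" = "D6" := by decide
  have hf10 : PySem.List.pyGetD pvFWD ((10:Int)) "" = "A2" := by decide
  have hb10 : PySem.List.pyGetD pvFWD (15 - (10:Int)) "" = "D5" := by decide
  have hf11 : PySem.List.pyGetD pvFWD ((11:Int)) "" = "A3" := by decide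
  have hb11 : PySem.List.pyGetD pvFWD (15 - (11:Int)) "" = "D4" := by decide
  have hf12 : PySem.List.pyGetD pvFWD ((12:Int)) "" = "A4" := by decide
  have hb12 : PySem.List.pyGetD pvFWD (15 - (12:Int)) "" = "D3" := by decide
  have hf13 : PySem.List.pyGetD pvFWD ((13:Int)) "" = "A5" := by decide
  have hb13 : PySem.List.pyGetD pvFWD (15 - (13:Int)) "" = "D2" := by decide
  have hf14 : PySem.List.pyGetD pvFWD ((14:Int)) "" = "A6" := by decide
  have hb14 : PySem.List.pyGetD pvFWD (15 - (14:Int)) "" = "D1" := by decide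
  have hf15 : PySem.List.pyGetD pvFWD ((15:Int)) "" = "SP" := by decide
  have hb15 : PySem.List.pyGetD pvFWD (15 - (15:Int)) "" = "D0" := by decide
  cases reverse <;>
    simp only [Bool.false_eq_true, if_false, if_true, h8, PySem.List.foldl_append_ite,
      pvFilterMapChunk, List.flatMap_cons, List.flatMap_nil, decide_eq_true_eq,
      List.map_append, pvMapChunk, List.append_assoc, List.append_nil,
      List.nil_append, Nat.div_one, s0, s1, s2, s3, s4, s5, s6, s7, t0, t1, t2, t3, t4, t5, t6, t7, B0, B1, B2, B3, B4, B5, B6, B7, B8, B9, B10, B11, B12, B13, B14, B15, d0, d1, d2, d3, d4, d5, d6, d7, a0, a1, a2, a3, a4, a5, a6, a7, rd0, rd1, rd2, rd3, rd4, rd5, rd6, rd7, ra0, ra1, ra2, ra3, ra4, ra5, ra6, ra7, hf0, hf1, hf2, hf3, hf4, hf5, hf6, hf7, hf8, hf9, hf10, hf11, hf12, hf13, hf14, hf15, hb0, hb1, hb2, hb3, hb4, hb5, hb6, hb7, hb8, hb9, hb10, hb11, hb12, hb13, hb14, hb15]
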